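-- pv_equiv track=rewrite | github.com/AallynReed/RenewedTroveToolsAPI | versions/v1/utils/functions.py | calculate_hash
-- ===== SOURCE A (Python) =====
-- def calculate_hash(data):
--     hash_value = 0x811C9DC5
--     prime = 0x1000193
--     length = len(data)
--     length_aligned = length & ~3
--
--     for i in range(0, length_aligned, 4):
--         chunk = data[i] | (data[i + 1] << 8) | (data[i + 2] << 16) | (data[i + 3] << 24)
--         hash_value ^= chunk
--         hash_value = (hash_value * prime) & 0xFFFFFFFF
--
--     if length - length_aligned > 0:
--         remainder = length - length_aligned
--         chunk = 0
--         for i in range(remainder):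
--             chunk |= data[length_aligned + i] << (i * 8)
--         hash_value ^= chunk
--         hash_value = (hash_value * prime) & 0xFFFFFFFF
--
--     return hash_value
-- ===== SOURCE B (Python) =====
-- def calculate_hash(data):
--     hash_value = 0x811C9DC5
--     prime = 0x1000193
--     it = iter(data)
--     for first in it:
--         chunk = first
--         shift = 8
--         for byte in it:
--             chunk |= byte << shift
--             if shift == 24:
--                 break
--             shift += 8
--         hash_value = ((hash_value ^ chunk) * prime) & 0xFFFFFFFF
--     return hash_value
-- ===== Notes on version B (the rewrite author's own statement) =====
-- stated objective: alternative
-- what changed: A's index arithmetic (len, alignment mask, two range loops with a special-cased tail) is replaced by a single shared-iterator pass: the outer for pulls the first byte of each chunk and a nested for on the same iterator pulls up to three more, so there is no length, no indexing and no tail branch.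
import Mathlib
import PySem

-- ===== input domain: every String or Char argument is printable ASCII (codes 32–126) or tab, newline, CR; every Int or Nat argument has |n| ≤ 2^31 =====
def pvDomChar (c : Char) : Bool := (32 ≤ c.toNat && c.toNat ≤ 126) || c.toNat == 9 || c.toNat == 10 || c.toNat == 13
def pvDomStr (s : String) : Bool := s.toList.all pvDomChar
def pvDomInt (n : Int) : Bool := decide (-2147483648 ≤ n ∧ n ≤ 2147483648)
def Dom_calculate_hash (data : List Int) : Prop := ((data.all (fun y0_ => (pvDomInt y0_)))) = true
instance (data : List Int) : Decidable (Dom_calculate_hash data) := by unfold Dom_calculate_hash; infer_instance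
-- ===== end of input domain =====

-- B replaces A's index arithmetic (len, alignment mask, two range loops with a special-cased
-- tail) by one pass over a shared iterator, pulling up to 4 bytes per chunk; same result (alternative).

-- ===== PORT A =====
def calculate_hash (data : List Int) : Int :=
  let hash_value : Int := 0x811C9DC5
  let prime : Int := 0x1000193
  let length : Int := PySem.List.len data
  let length_aligned : Int := PySem.Int.band length (Int.not 3)
  let hash_value :=
    (PySem.List.pyRange 0 length_aligned 4).foldl (fun hv i =>
      let chunk :=
        PySem.Int.bor (PySem.Int.bor (PySem.Int.bor (PySem.List.pyGetD data i 0)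
          ((PySem.List.pyGetD data (i + 1) 0) <<< (8 : Nat)))
          ((PySem.List.pyGetD data (i + 2) 0) <<< (16 : Nat)))
          ((PySem.List.pyGetD data (i + 3) 0) <<< (24 : Nat))
      let hv := PySem.Int.bxor hv chunk
      PySem.Int.band (hv * prime) 0xFFFFFFFF) hash_value
  if length - length_aligned > 0 then
    let remainder := length - length_aligned
    -- shift count i*8 is ≥ 0 throughout (i ranges over range(remainder)), so .toNat is exact
    let chunk :=
      (PySem.List.pyRange 0 remainder 1).foldl (fun c i =>
        PySem.Int.bor c ((PySem.List.pyGetD data (length_aligned + i) 0) <<< (i * 8).toNat)) 0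
    let hash_value := PySem.Int.bxor hash_value chunk
    PySem.Int.band (hash_value * prime) 0xFFFFFFFF
  else hash_value

-- ===== PORT B =====
-- the inner 'for byte in it' loop: consumes bytes from the iterator's remaining list,
-- OR-ing them at shifts 8,16,24, and returns (chunk, remaining iterator)
def pvInnerB : List Int → Int → Nat → Int × List Int
  | [], c, _ => (c, [])
  | b :: rest, c, shift =>
    let c' := PySem.Int.bor c (b <<< shift)
    if shift == 24 then (c', rest) else pvInnerB rest c' (shift + 8)

-- needed by pvOuterB's termination: the inner loop never lengthens the iterator
theorem pvInnerB_len_le : ∀ (l : List Int) (c : Int) (s : Nat),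
    (pvInnerB l c s).2.length ≤ l.length := by
  intro l
  induction l with
  | nil => intro c s; simp [pvInnerB]
  | cons b rest ih =>
    intro c s
    simp only [pvInnerB]
    split
    · simp
    · exact le_trans (ih _ _) (by simp)

-- the outer 'for first in it' loop over the same iterator
def pvOuterB : List Int → Int → Int
  | [], h => h
  | first :: it, h =>
    let p := pvInnerB it first 8
    pvOuterB p.2 (PySem.Int.band ((PySem.Int.bxor h p.1) * 0x1000193) 0xFFFFFFFF)
termination_by l _ => l.length
decreasing_by
  simp only [List.length_cons]
  exact Nat.lt_succ_of_le (pvInnerB_len_le _ _ _)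

def calculate_hash_alt (data : List Int) : Int := pvOuterB data 0x811C9DC5

-- ===== PRECONDITION & SPEC =====
def Spec_calculate_hash (data : List Int) (out : Int) : Prop := out = calculate_hash_alt data
instance (data : List Int) (out : Int) : Decidable (Spec_calculate_hash data out) := by unfold Spec_calculate_hash; infer_instance

-- ===== CLAIM (what is proved, stated in full; the proofs are below) =====
def Claim_equal_calculate_hash : Prop := ∀ (data : List Int), Dom_calculate_hash data → Spec_calculate_hash data (calculate_hash data)

-- ===== LEMMAS AND PROOFS =====

-- proof-only middle form: one uniform chunked loop over range(0, len, 4)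
def pvChunkLoop (data : List Int) (h : Int) : Int :=
  (PySem.List.pyRange 0 ((data.length : Nat) : Int) 4).foldl (fun hv i =>
    let chunk :=
      (PySem.List.pyRange 0 (min 4 (((data.length : Nat) : Int) - i)) 1).foldl (fun c j =>
        PySem.Int.bor c ((PySem.List.pyGetD data (i + j) 0) <<< (j * 8).toNat)) 0
    PySem.Int.band ((PySem.Int.bxor hv chunk) * 0x1000193) 0xFFFFFFFF) h

theorem zero_bor (x : Int) : PySem.Int.bor 0 x = x := by
  rw [PySem.Int.bor_comm]; exact PySem.Int.bor_zero x

theorem band_not_three (n : Nat) : PySem.Int.band (n : Int) (Int.not 3) = ((4 * (n / 4) : Nat) : Int) := by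
  have h3 : Int.not 3 = -4 := by decide
  rw [h3]
  simp only [PySem.Int.band]
  rw [if_pos (by positivity), if_neg (by norm_num)]
  have h2 : (-(-4:Int) - 1).toNat = 3 := by decide
  simp only [h2, Int.toNat_natCast]
  have hm : n &&& 3 = n % 4 := by
    have := Nat.and_two_pow_sub_one_eq_mod n 2
    norm_num at this; exact this
  rw [hm]; omega

theorem body_eq (data : List Int) (L : Int) (hv i : Int) (h4 : min 4 (L - i) = 4) :
    PySem.Int.band ((PySem.Int.bxor hv
      ((PySem.List.pyRange 0 (min 4 (L - i)) 1).foldl (fun c j =>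
        PySem.Int.bor c ((PySem.List.pyGetD data (i + j) 0) <<< (j * 8).toNat)) 0)) * 0x1000193) 0xFFFFFFFF
    =
    PySem.Int.band ((PySem.Int.bxor hv
      (PySem.Int.bor (PySem.Int.bor (PySem.Int.bor (PySem.List.pyGetD data i 0)
          ((PySem.List.pyGetD data (i + 1) 0) <<< (8 : Nat)))
          ((PySem.List.pyGetD data (i + 2) 0) <<< (16 : Nat)))
          ((PySem.List.pyGetD data (i + 3) 0) <<< (24 : Nat)))) * 0x1000193) 0xFFFFFFFF := by
  rw [h4]
  have hr : PySem.List.pyRange 0 4 1 = [0, 1, 2, 3] := by decide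
  simp only [hr, List.foldl, zero_bor]
  norm_num
  rfl

theorem range_split (n : Nat) (h : n % 4 ≠ 0) :
    PySem.List.pyRange 0 (n : Int) 4 = PySem.List.pyRange 0 ((4 * (n / 4) : Nat) : Int) 4 ++ [((4 * (n / 4) : Nat) : Int)] := by
  rw [PySem.List.pyRange_of_pos _ _ (by norm_num : (0:Int) < 4),
      PySem.List.pyRange_of_pos _ _ (by norm_num : (0:Int) < 4)]
  rw [if_pos (by omega : (0:Int) < (n:Int))]
  have hc1 : (((n : Int) - 0 + 4 - 1) / 4).toNat = n / 4 + 1 := by omega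
  rw [hc1, List.range_succ, List.map_append]
  split_ifs with hp
  · have hc2 : ((((4 * (n / 4) : Nat) : Int) - 0 + 4 - 1) / 4).toNat = n / 4 := by omega
    rw [hc2]
    congr 1
    simp
  · have hz : n / 4 = 0 := by omega
    simp [hz]

theorem min4 (n : Nat) (i : Int) (hi : i ∈ PySem.List.pyRange 0 ((4 * (n / 4) : Nat) : Int) 4)
    (hla : (4 * (n / 4) : Nat) ≤ n) :
    min 4 ((n : Int) - i) = 4 := by
  rw [PySem.List.mem_pyRange_iff_of_pos (by norm_num)] at hi
  obtain ⟨h0, h1, h2⟩ := hi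
  obtain ⟨k, hk⟩ := h2
  omega

-- A equals the uniform chunked loop
theorem a_eq_chunkLoop (data : List Int) : calculate_hash data = pvChunkLoop data 0x811C9DC5 := by
  simp only [calculate_hash, pvChunkLoop]
  have hlen : PySem.List.len data = (data.length : Int) := by simp
  rw [hlen, band_not_three data.length]
  set n := data.length with hn
  have hla : (4 * (n / 4) : Nat) ≤ n := by omega
  by_cases h0 : n % 4 = 0
  · have he : ((4 * (n / 4) : Nat) : Int) = (n : Int) := by omega
    rw [he]
    rw [if_neg (by omega)]
    exact (PySem.List.foldl_congr_mem _ _ _ _ (fun acc x hx => by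
      rw [← he] at hx
      exact body_eq data (n : Int) acc x (min4 n x hx hla))).symm
  · rw [range_split n h0, List.foldl_append]
    rw [if_pos (by omega)]
    rw [PySem.List.foldl_congr_mem _ _
        (fun hv i =>
          PySem.Int.band ((PySem.Int.bxor hv
            ((PySem.List.pyRange 0 (min 4 ((n:Int) - i)) 1).foldl (fun c j =>
              PySem.Int.bor c ((PySem.List.pyGetD data (i + j) 0) <<< (j * 8).toNat)) 0)) * 0x1000193) 0xFFFFFFFF)
        _ (fun acc x hx => (body_eq data (n : Int) acc x (min4 n x hx hla)).symm)]
    simp only [List.foldl]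
    have hmin : min 4 ((n : Int) - ((4 * (n / 4) : Nat) : Int)) = (n : Int) - ((4 * (n / 4) : Nat) : Int) := by omega
    rw [hmin]

-- range(0, m+4, 4) = 0 :: (range(0, m, 4) shifted by 4)
theorem range4_shift (m : Nat) :
    PySem.List.pyRange 0 ((m : Int) + 4) 4 = 0 :: (PySem.List.pyRange 0 (m : Int) 4).map (· + 4) := by
  rw [PySem.List.pyRange_of_pos _ _ (by norm_num : (0:Int) < 4),
      PySem.List.pyRange_of_pos _ _ (by norm_num : (0:Int) < 4)]
  have hc1 : (if (0:Int) < (m : Int) + 4 then ((((m:Int) + 4) - 0 + 4 - 1) / 4).toNat else 0) = (m + 3) / 4 + 1 := by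
    rw [if_pos (by omega)]; omega
  have hc2 : (if (0:Int) < (m : Int) then (((m:Int) - 0 + 4 - 1) / 4).toNat else 0) = (m + 3) / 4 := by
    split_ifs with h
    · omega
    · omega
  rw [hc1, hc2, List.range_succ_eq_map, List.map_cons, List.map_map, List.map_map]
  refine congrArg₂ _ (by norm_num) ?_
  refine List.map_congr_left (fun k hk => ?_)
  simp only [Function.comp_apply]
  push_cast
  ring

theorem pyGetD_cons_add_one (w : Int) (l : List Int) (k : Int) (hk : 0 ≤ k) (d : Int) :
    PySem.List.pyGetD (w :: l) (k + 1) d = PySem.List.pyGetD l k d := by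
  obtain ⟨k, rfl⟩ := Int.eq_ofNat_of_zero_le hk
  have : ((k : Int) + 1) = ((k + 1 : Nat) : Int) := by push_cast; ring
  rw [this, PySem.List.pyGetD_natCast, PySem.List.pyGetD_natCast, List.getD_cons_succ]

theorem pyGetD_cons4 (a b c d : Int) (t : List Int) (k : Int) (hk : 0 ≤ k) (e : Int) :
    PySem.List.pyGetD (a :: b :: c :: d :: t) (k + 4) e = PySem.List.pyGetD t k e := by
  have h4 : k + 4 = (((k + 3) + 1 : Int)) := by ring
  rw [h4, pyGetD_cons_add_one _ _ _ (by omega)]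
  have h3 : k + 3 = (((k + 2) + 1 : Int)) := by ring
  rw [h3, pyGetD_cons_add_one _ _ _ (by omega)]
  have h2 : k + 2 = (((k + 1) + 1 : Int)) := by ring
  rw [h2, pyGetD_cons_add_one _ _ _ (by omega)]
  rw [pyGetD_cons_add_one _ _ _ hk]

-- the uniform chunked loop equals B's iterator recursion
theorem chunkLoop_eq_outerB : ∀ (n : Nat) (data : List Int), data.length = n →
    ∀ h, pvChunkLoop data h = pvOuterB data h := by
  intro n
  induction n using Nat.strong_induction_on with
  | _ n ih =>
  intro data hlen h
  rcases data with _ | ⟨a, _ | ⟨b, _ | ⟨c, _ | ⟨d, t⟩⟩⟩⟩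
  · simp [pvChunkLoop, pvOuterB, PySem.List.pyRange]
  · simp only [pvChunkLoop, pvOuterB, pvInnerB, List.length_cons, List.length_nil]
    norm_num
    rw [show PySem.List.pyRange 0 1 4 = [0] from by decide]
    simp only [List.foldl_cons, List.foldl_nil]
    norm_num
    rw [show PySem.List.pyRange 0 1 1 = [0] from by decide]
    simp [List.foldl_cons, List.foldl_nil, zero_bor, PySem.List.pyGetD_ofNat']
  · simp only [pvChunkLoop, pvOuterB, pvInnerB, List.length_cons, List.length_nil]
    norm_num
    rw [show PySem.List.pyRange 0 2 4 = [0] from by decide]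
    simp only [List.foldl_cons, List.foldl_nil]
    norm_num
    rw [show PySem.List.pyRange 0 2 1 = [0, 1] from by decide]
    simp [List.foldl_cons, List.foldl_nil, zero_bor, pvOuterB,
          PySem.List.pyGetD_ofNat']
  · simp only [pvChunkLoop, pvOuterB, pvInnerB, List.length_cons, List.length_nil]
    norm_num
    rw [show PySem.List.pyRange 0 3 4 = [0] from by decide]
    simp only [List.foldl_cons, List.foldl_nil]
    norm_num
    rw [show PySem.List.pyRange 0 3 1 = [0, 1, 2] from by decide]
    simp [List.foldl_cons, List.foldl_nil, zero_bor, pvOuterB,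
          PySem.List.pyGetD_ofNat']
  · -- data = a :: b :: c :: d :: t
    have hm : ((a :: b :: c :: d :: t).length : Int) = (t.length : Int) + 4 := by
      simp; ring
    simp only [pvChunkLoop]
    rw [hm, range4_shift t.length]
    rw [List.foldl_cons, List.foldl_map]
    -- head chunk
    have hhead :
        (PySem.List.pyRange 0 (min 4 ((t.length : Int) + 4 - 0)) 1).foldl (fun cc j =>
            PySem.Int.bor cc ((PySem.List.pyGetD (a :: b :: c :: d :: t) (0 + j) 0) <<< (j * 8).toNat)) 0
          = PySem.Int.bor (PySem.Int.bor (PySem.Int.bor a (b <<< (8:Nat))) (c <<< (16:Nat))) (d <<< (24:Nat)) := by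
      have : min 4 ((t.length : Int) + 4 - 0) = 4 := by omega
      rw [this, show PySem.List.pyRange 0 4 1 = [0, 1, 2, 3] from by decide]
      simp [List.foldl_cons, List.foldl_nil, zero_bor,
            PySem.List.pyGetD_ofNat']
    rw [hhead]
    -- remaining fold: shift indices by 4 and recurse into t
    rw [PySem.List.foldl_congr_mem _ _
        (fun hv i =>
          PySem.Int.band ((PySem.Int.bxor hv
            ((PySem.List.pyRange 0 (min 4 ((t.length : Int) - i)) 1).foldl (fun cc j =>
              PySem.Int.bor cc ((PySem.List.pyGetD t (i + j) 0) <<< (j * 8).toNat)) 0)) * 0x1000193) 0xFFFFFFFF)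
        _ (fun hv i hi => by
          have hi0 : 0 ≤ i := by
            rw [PySem.List.mem_pyRange_iff_of_pos (by norm_num)] at hi
            exact hi.1
          have hmin : min 4 ((t.length : Int) + 4 - (i + 4)) = min 4 ((t.length : Int) - i) := by omega
          rw [hmin]
          congr 1
          congr 2
          refine PySem.List.foldl_congr_mem _ _ _ _ (fun cc j hj => ?_)
          have hj0 : 0 ≤ j := (PySem.List.mem_pyRange_one.mp hj).1
          have hidx : i + 4 + j = (i + j) + 4 := by ring
          rw [hidx, pyGetD_cons4 _ _ _ _ _ _ (by omega)])]
    have hlt : t.length < n := by simp at hlen; omega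
    have hrec := ih t.length hlt t rfl
        (PySem.Int.band ((PySem.Int.bxor h
          (PySem.Int.bor (PySem.Int.bor (PySem.Int.bor a (b <<< (8:Nat))) (c <<< (16:Nat))) (d <<< (24:Nat)))) * 0x1000193) 0xFFFFFFFF)
    simp only [pvChunkLoop] at hrec
    rw [hrec]
    -- evaluate one step of pvOuterB on the right
    conv_rhs => rw [pvOuterB]
    simp only [pvInnerB]
    norm_num

theorem main_eq (data : List Int) : calculate_hash data = calculate_hash_alt data := by
  rw [a_eq_chunkLoop, calculate_hash_alt, chunkLoop_eq_outerB data.length data rfl]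

-- ===== VERDICT (by name: the statement is the Claim_ definition above) =====
theorem calculate_hash_spec : Claim_equal_calculate_hash := by
  intro data _
  exact main_eq data
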